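-- pv_equiv track=rewrite | github.com/pawelsloboda5/linkedin-scrape | data_analyze.py | analyze_job_levels
-- ===== SOURCE A (Python) =====
-- from collections import Counter
--
-- def analyze_job_levels(job_titles):
--     """Categorize job titles into levels"""
--     leadership_keywords = ['chief', 'ceo', 'cfo', 'cto', 'cio', 'president', 'founder']
--     director_keywords = ['director', 'vp', 'vice president', 'head of']
--     manager_keywords = ['manager', 'lead', 'senior', 'principal']
--     associate_keywords = ['associate', 'specialist', 'analyst', 'consultant']
--
--     job_levels = Counter()
--
--     for title in job_titles:
--         title_lower = title.lower()
--
--         if any(keyword in title_lower for keyword in leadership_keywords):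
--             job_levels['C-Suite/Leadership'] += 1
--         elif any(keyword in title_lower for keyword in director_keywords):
--             job_levels['Director/VP'] += 1
--         elif any(keyword in title_lower for keyword in manager_keywords):
--             job_levels['Manager/Senior'] += 1
--         elif any(keyword in title_lower for keyword in associate_keywords):
--             job_levels['Associate/Specialist'] += 1
--         else:
--             job_levels['Other'] += 1
--
--     return job_levels
-- ===== SOURCE B (Python) =====
-- from collections import Counter
--
-- # Flat keyword -> priority map (0 = most senior bucket), plus the bucket names by priority.
-- _KEYWORD_PRIO = {
--     'chief': 0, 'ceo': 0, 'cfo': 0, 'cto': 0, 'cio': 0, 'president': 0, 'founder': 0,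
--     'director': 1, 'vp': 1, 'vice president': 1, 'head of': 1,
--     'manager': 2, 'lead': 2, 'senior': 2, 'principal': 2,
--     'associate': 3, 'specialist': 3, 'analyst': 3, 'consultant': 3,
-- }
-- _LABELS = ['C-Suite/Leadership', 'Director/VP', 'Manager/Senior', 'Associate/Specialist', 'Other']
--
-- def analyze_job_levels(job_titles):
--     """Categorize job titles into levels"""
--     # Pass 1: map each title to the best (lowest) priority among ALL matching keywords.
--     labels = []
--     for title in job_titles:
--         title_lower = title.lower()
--         prio = min((p for k, p in _KEYWORD_PRIO.items() if k in title_lower), default=4)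
--         labels.append(_LABELS[prio])
--     # Pass 2: aggregate — distinct labels in first-occurrence order, each with its total count.
--     result = Counter()
--     for lab in dict.fromkeys(labels):
--         result[lab] = labels.count(lab)
--     return result
-- ===== Notes on version B (the rewrite author's own statement) =====
-- stated objective: alternative
-- what changed: Replaced the if/elif first-match cascade with an incremented Counter by two staged passes: a flat keyword->priority map whose minimum matching priority (min with default) picks each title's label, then an aggregation that pairs each distinct label (dict.fromkeys order) with labels.count(label).
import Mathlib
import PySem

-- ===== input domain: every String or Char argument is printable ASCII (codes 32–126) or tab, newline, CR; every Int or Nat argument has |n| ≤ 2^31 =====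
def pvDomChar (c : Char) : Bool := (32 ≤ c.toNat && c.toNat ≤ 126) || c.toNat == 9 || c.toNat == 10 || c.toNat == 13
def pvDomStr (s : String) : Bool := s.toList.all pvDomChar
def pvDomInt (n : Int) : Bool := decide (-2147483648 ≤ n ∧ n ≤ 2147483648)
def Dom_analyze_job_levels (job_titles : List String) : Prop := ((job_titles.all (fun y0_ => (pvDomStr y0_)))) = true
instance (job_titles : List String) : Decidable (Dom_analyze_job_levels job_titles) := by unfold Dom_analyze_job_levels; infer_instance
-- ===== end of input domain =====

-- B replaces A's if/elif cascade with two staged passes: a minimum matching priority over a flat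
-- keyword→priority map picks each title's label, then distinct labels are paired with their counts
-- (objective: alternative; same cost).

-- ===== PORT A =====
def analyze_job_levels (job_titles : List String) : List (String × Int) :=
  let leadership_keywords := ["chief", "ceo", "cfo", "cto", "cio", "president", "founder"]
  let director_keywords := ["director", "vp", "vice president", "head of"]
  let manager_keywords := ["manager", "lead", "senior", "principal"]
  let associate_keywords := ["associate", "specialist", "analyst", "consultant"]
  let job_levels : PySem.Dict String Int := PySem.Dict.empty
  let job_levels := job_titles.foldl (fun job_levels title =>
    let title_lower := PySem.Str.lower title
    if leadership_keywords.any (fun keyword => PySem.Str.isIn keyword title_lower) then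
      job_levels.modify "C-Suite/Leadership" 0 (· + 1)
    else if director_keywords.any (fun keyword => PySem.Str.isIn keyword title_lower) then
      job_levels.modify "Director/VP" 0 (· + 1)
    else if manager_keywords.any (fun keyword => PySem.Str.isIn keyword title_lower) then
      job_levels.modify "Manager/Senior" 0 (· + 1)
    else if associate_keywords.any (fun keyword => PySem.Str.isIn keyword title_lower) then
      job_levels.modify "Associate/Specialist" 0 (· + 1)
    else
      job_levels.modify "Other" 0 (· + 1)) job_levels
  job_levels.items

-- ===== PORT B =====
def pvKeywordPrio : List (String × Int) :=
  [("chief", 0), ("ceo", 0), ("cfo", 0), ("cto", 0), ("cio", 0), ("president", 0), ("founder", 0),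
   ("director", 1), ("vp", 1), ("vice president", 1), ("head of", 1),
   ("manager", 2), ("lead", 2), ("senior", 2), ("principal", 2),
   ("associate", 3), ("specialist", 3), ("analyst", 3), ("consultant", 3)]

def pvLabels : List String := ["C-Suite/Leadership", "Director/VP", "Manager/Senior", "Associate/Specialist", "Other"]

-- the generator '(p for k, p in _KEYWORD_PRIO.items() if k in title_lower)'
def pvMatches (title_lower : String) : List Int :=
  (pvKeywordPrio.filter (fun p => PySem.Str.isIn p.1 title_lower)).map Prod.snd

-- one title's label: min(..., default=4) then _LABELS[prio]; prio is always 0..4, in range for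
-- pvLabels, so the defaulting indexer pyGetD is exact here.
def pvClassify (title : String) : String :=
  let title_lower := PySem.Str.lower title
  PySem.List.pyGetD pvLabels (PySem.List.minD (pvMatches title_lower) (fun x => x) 4) ""

def analyze_job_levels_alt (job_titles : List String) : List (String × Int) :=
  let labels := job_titles.map pvClassify
  (PySem.List.dedup labels).map (fun lab => (lab, PySem.List.count labels lab))

-- ===== PRECONDITION & SPEC =====
def Spec_analyze_job_levels (job_titles : List String) (out : List (String × Int)) : Prop := out = analyze_job_levels_alt job_titles
instance (job_titles : List String) (out : List (String × Int)) : Decidable (Spec_analyze_job_levels job_titles out) := by unfold Spec_analyze_job_levels; infer_instance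

-- ===== CLAIM =====
def Claim_equal_analyze_job_levels : Prop := ∀ (job_titles : List String), Dom_analyze_job_levels job_titles → Spec_analyze_job_levels job_titles (analyze_job_levels job_titles)

-- ===== LEMMAS AND PROOFS =====

-- min over an Int list with identity key returns any member that is a lower bound
theorem pv_min_eq (l : List Int) (m : Int) (hm : m ∈ l) (hlb : ∀ x ∈ l, m ≤ x) :
    PySem.List.minD l (fun x => x) 4 = m := by
  have hne : l ≠ [] := List.ne_nil_of_mem hm
  have hmem := PySem.List.minD_mem l (fun x => x) 4 hne
  have hle : PySem.List.minD l (fun x => x) 4 ≤ m := by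
    simpa using PySem.List.min?_isMin (PySem.List.min?_eq_some_minD l (fun x => x) 4 hne) m hm
  exact le_antisymm hle (hlb _ hmem)

theorem pv_mem_matches (tl kw : String) (x : Int) (h : PySem.Str.isIn kw tl = true)
    (hkw : (kw, x) ∈ pvKeywordPrio) : x ∈ pvMatches tl := by
  unfold pvMatches
  exact List.mem_map.mpr ⟨(kw, x), List.mem_filter.mpr ⟨hkw, h⟩, rfl⟩

-- A's per-title if/elif value is exactly one counter increment at B's classified label.
theorem pv_step_eq (d : PySem.Dict String Int) (title : String) :
    (let title_lower := PySem.Str.lower title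
     if (["chief", "ceo", "cfo", "cto", "cio", "president", "founder"]).any (fun keyword => PySem.Str.isIn keyword title_lower) then
       d.modify "C-Suite/Leadership" 0 (· + 1)
     else if (["director", "vp", "vice president", "head of"]).any (fun keyword => PySem.Str.isIn keyword title_lower) then
       d.modify "Director/VP" 0 (· + 1)
     else if (["manager", "lead", "senior", "principal"]).any (fun keyword => PySem.Str.isIn keyword title_lower) then
       d.modify "Manager/Senior" 0 (· + 1)
     else if (["associate", "specialist", "analyst", "consultant"]).any (fun keyword => PySem.Str.isIn keyword title_lower) then
       d.modify "Associate/Specialist" 0 (· + 1)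
     else
       d.modify "Other" 0 (· + 1)) = d.modify (pvClassify title) 0 (· + 1) := by
  unfold pvClassify
  dsimp only
  split_ifs with h0 h1 h2 h3
  · have hmin : PySem.List.minD (pvMatches (PySem.Str.lower title)) (fun x => x) 4 = 0 := by
      apply pv_min_eq
      · simp only [List.any_cons, List.any_nil, Bool.or_eq_true, Bool.false_eq_true, or_false] at h0
        rcases h0 with h | h | h | h | h | h | h <;> exact pv_mem_matches _ _ 0 h (by decide)
      · intro x hx
        simp only [pvMatches, List.mem_map, List.mem_filter] at hx
        obtain ⟨p, ⟨hpm, hfil⟩, rfl⟩ := hx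
        fin_cases hpm <;> norm_num
    rw [hmin]
    rfl
  · simp only [List.any_cons, List.any_nil, Bool.or_eq_true, Bool.false_eq_true, or_false, not_or] at h0
    have hmin : PySem.List.minD (pvMatches (PySem.Str.lower title)) (fun x => x) 4 = 1 := by
      apply pv_min_eq
      · simp only [List.any_cons, List.any_nil, Bool.or_eq_true, Bool.false_eq_true, or_false] at h1
        rcases h1 with h | h | h | h <;> exact pv_mem_matches _ _ 1 h (by decide)
      · intro x hx
        simp only [pvMatches, List.mem_map, List.mem_filter] at hx
        obtain ⟨p, ⟨hpm, hfil⟩, rfl⟩ := hx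
        fin_cases hpm
        exacts [absurd hfil h0.1, absurd hfil h0.2.1, absurd hfil h0.2.2.1, absurd hfil h0.2.2.2.1, absurd hfil h0.2.2.2.2.1, absurd hfil h0.2.2.2.2.2.1, absurd hfil h0.2.2.2.2.2.2, by norm_num, by norm_num, by norm_num, by norm_num, by norm_num, by norm_num, by norm_num, by norm_num, by norm_num, by norm_num, by norm_num, by norm_num]
    rw [hmin]
    rfl
  · simp only [List.any_cons, List.any_nil, Bool.or_eq_true, Bool.false_eq_true, or_false, not_or] at h0 h1
    have hmin : PySem.List.minD (pvMatches (PySem.Str.lower title)) (fun x => x) 4 = 2 := by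
      apply pv_min_eq
      · simp only [List.any_cons, List.any_nil, Bool.or_eq_true, Bool.false_eq_true, or_false] at h2
        rcases h2 with h | h | h | h <;> exact pv_mem_matches _ _ 2 h (by decide)
      · intro x hx
        simp only [pvMatches, List.mem_map, List.mem_filter] at hx
        obtain ⟨p, ⟨hpm, hfil⟩, rfl⟩ := hx
        fin_cases hpm
        exacts [absurd hfil h0.1, absurd hfil h0.2.1, absurd hfil h0.2.2.1, absurd hfil h0.2.2.2.1, absurd hfil h0.2.2.2.2.1, absurd hfil h0.2.2.2.2.2.1, absurd hfil h0.2.2.2.2.2.2, absurd hfil h1.1, absurd hfil h1.2.1, absurd hfil h1.2.2.1, absurd hfil h1.2.2.2, by norm_num, by norm_num, by norm_num, by norm_num, by norm_num, by norm_num, by norm_num, by norm_num]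
    rw [hmin]
    rfl
  · simp only [List.any_cons, List.any_nil, Bool.or_eq_true, Bool.false_eq_true, or_false, not_or] at h0 h1 h2
    have hmin : PySem.List.minD (pvMatches (PySem.Str.lower title)) (fun x => x) 4 = 3 := by
      apply pv_min_eq
      · simp only [List.any_cons, List.any_nil, Bool.or_eq_true, Bool.false_eq_true, or_false] at h3
        rcases h3 with h | h | h | h <;> exact pv_mem_matches _ _ 3 h (by decide)
      · intro x hx
        simp only [pvMatches, List.mem_map, List.mem_filter] at hx
        obtain ⟨p, ⟨hpm, hfil⟩, rfl⟩ := hx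
        fin_cases hpm
        exacts [absurd hfil h0.1, absurd hfil h0.2.1, absurd hfil h0.2.2.1, absurd hfil h0.2.2.2.1, absurd hfil h0.2.2.2.2.1, absurd hfil h0.2.2.2.2.2.1, absurd hfil h0.2.2.2.2.2.2, absurd hfil h1.1, absurd hfil h1.2.1, absurd hfil h1.2.2.1, absurd hfil h1.2.2.2, absurd hfil h2.1, absurd hfil h2.2.1, absurd hfil h2.2.2.1, absurd hfil h2.2.2.2, by norm_num, by norm_num, by norm_num, by norm_num]
    rw [hmin]
    rfl
  · simp only [List.any_cons, List.any_nil, Bool.or_eq_true, Bool.false_eq_true, or_false, not_or] at h0 h1 h2 h3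
    have hnil : pvMatches (PySem.Str.lower title) = [] := by
      unfold pvMatches
      have hfil : pvKeywordPrio.filter (fun p => PySem.Str.isIn p.1 (PySem.Str.lower title)) = [] := by
        rw [List.filter_eq_nil_iff]
        intro p hp
        fin_cases hp <;> simp_all
      rw [hfil, List.map_nil]
    rw [hnil]
    rfl

-- ===== VERDICT =====
theorem analyze_job_levels_spec : Claim_equal_analyze_job_levels := by
  intro job_titles _
  unfold Spec_analyze_job_levels analyze_job_levels analyze_job_levels_alt
  dsimp only
  have hf := funext fun d : PySem.Dict String Int => funext fun t : String => pv_step_eq d t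
  rw [hf]
  have hc : (List.foldl (fun d t => d.modify (pvClassify t) 0 fun x => x + 1) PySem.Dict.empty job_titles)
      = PySem.Dict.counter (job_titles.map pvClassify) := by
    rw [PySem.Dict.counter_eq_foldl, List.foldl_map]
  rw [hc, PySem.Dict.items_counter]
  simp [PySem.List.dedup_eq_ofList, PySem.List.count_eq]
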